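-- pv_equiv track=rewrite | github.com/CorneliaNox/study_cases | calculation/printing.py | print_result
-- ===== SOURCE A (Python) =====
-- def print_result(calculation):
--     symbols_p34 = "+-*/"
--     new_calculation = ""
--     for i in calculation:
--         if i in symbols_p34:
--             new_calculation = new_calculation + " " + i + " "
--         else:
--             new_calculation = new_calculation + i
--     return new_calculation
-- ===== SOURCE B (Python) =====
-- def print_result(calculation):
--     for op in "+-*/":
--         calculation = calculation.replace(op, f" {op} ")
--     return calculation
-- ===== Notes on version B (the rewrite author's own statement) =====
-- stated objective: idiomatic
-- what changed: Replaced the character-by-character scan with quadratic string concatenation by four whole-string str.replace passes, one per operator; the operators and the inserted spaces are disjoint, so the passes compose to the same result.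
import Mathlib
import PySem

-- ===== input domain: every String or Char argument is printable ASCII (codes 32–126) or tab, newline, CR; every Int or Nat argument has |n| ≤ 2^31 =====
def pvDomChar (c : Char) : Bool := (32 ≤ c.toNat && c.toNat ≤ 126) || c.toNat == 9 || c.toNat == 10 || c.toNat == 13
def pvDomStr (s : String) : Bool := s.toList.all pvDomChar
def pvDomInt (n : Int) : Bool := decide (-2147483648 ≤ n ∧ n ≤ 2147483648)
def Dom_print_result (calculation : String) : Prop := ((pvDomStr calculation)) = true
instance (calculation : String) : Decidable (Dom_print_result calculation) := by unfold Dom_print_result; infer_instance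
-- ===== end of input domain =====

-- B replaces A's single character-by-character scan with four whole-string str.replace passes, one per operator (idiomatic; same output).

-- ===== PORT A =====
-- A: scan the characters, appending " c " for operator characters and c otherwise.
def print_result (calculation : String) : String :=
  String.ofList (calculation.toList.foldl
    (fun acc c => if PySem.Chars.isIn [c] "+-*/".toList then acc ++ [' ', c, ' '] else acc ++ [c]) [])

-- ===== PORT B =====
-- B: for op in "+-*/": calculation = calculation.replace(op, f" {op} ")
def print_result_alt (calculation : String) : String :=
  ("+-*/".toList).foldl
    (fun s op => PySem.Str.replace s (String.ofList [op]) (String.ofList [' ', op, ' '])) calculation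

-- ===== PRECONDITION & SPEC =====
def Spec_print_result (calculation : String) (out : String) : Prop := out = print_result_alt calculation
instance (calculation : String) (out : String) : Decidable (Spec_print_result calculation out) := by unfold Spec_print_result; infer_instance

-- ===== CLAIM (what is proved, stated in full; the proofs are below) =====
def Claim_equal_print_result : Prop := ∀ (calculation : String), Dom_print_result calculation → Spec_print_result calculation (print_result calculation)

-- ===== LEMMAS AND PROOFS =====

-- per-operator-set expansion of a character
def pvExpand (P : List Char) (c : Char) : List Char :=
  if c ∈ P then [' ', c, ' '] else [c]

-- replace with a single-character pattern is the obvious flatMap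
lemma replace_go_single (a : Char) (r : List Char) :
    ∀ (l : List Char) (fuel : Nat) (acc : List Char), l.length ≤ fuel →
      PySem.Chars.replace.go [a] r fuel l acc
        = acc.reverse ++ l.flatMap (fun c => if c = a then r else [c]) := by
  intro l
  induction l with
  | nil =>
    intro fuel acc _
    cases fuel <;> simp [PySem.Chars.replace.go]
  | cons c t ih =>
    intro fuel acc hle
    cases fuel with
    | zero => simp at hle
    | succ f =>
      by_cases hc : c = a
      · subst hc
        have : List.isPrefixOf [c] (c :: t) = true := by simp [List.isPrefixOf]
        simp [PySem.Chars.replace.go, this, ih f (r.reverse ++ acc) (by simpa using hle)]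
      · have : List.isPrefixOf [a] (c :: t) = false := by
          simp [List.isPrefixOf]; exact fun h => (hc h.symm).elim
        simp [PySem.Chars.replace.go, this, ih f (c :: acc) (by simpa using hle), hc]

lemma replace_single (s : List Char) (a : Char) (r : List Char) :
    PySem.Chars.replace s [a] r = s.flatMap (fun c => if c = a then r else [c]) := by
  simpa using replace_go_single a r s s.length [] (le_refl _)

-- one replace pass on an already-expanded string extends the operator set
lemma replace_expand_step (P : List Char) (a : Char) (ha : a ∉ P) (ha' : a ≠ ' ') (s : List Char) :
    PySem.Chars.replace (s.flatMap (pvExpand P)) [a] [' ', a, ' ']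
      = s.flatMap (pvExpand (a :: P)) := by
  rw [replace_single, List.flatMap_assoc]
  refine List.flatMap_congr ?_
  intro c _
  by_cases hcP : c ∈ P
  · have hca : c ≠ a := fun h => ha (h ▸ hcP)
    simp [pvExpand, hcP, hca, Ne.symm ha']
  · by_cases hca : c = a
    · subst hca
      simp [pvExpand, hcP]
    · simp [pvExpand, hcP, hca]

-- A's loop accumulates exactly the flatMap of the expansion over the operator set
lemma a_foldl (ops : List Char) (s : List Char) :
    ∀ acc : List Char,
      s.foldl (fun acc c => if PySem.Chars.isIn [c] ops then acc ++ [' ', c, ' '] else acc ++ [c]) acc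
        = acc ++ s.flatMap (pvExpand ops) := by
  induction s with
  | nil => simp
  | cons c t ih =>
    intro acc
    have hm : PySem.Chars.isIn [c] ops = true ↔ c ∈ ops := by
      rw [PySem.Chars.isIn_iff_infix, List.singleton_infix_iff]
    by_cases hc : c ∈ ops
    · rw [List.foldl_cons, if_pos (hm.mpr hc), ih]
      simp [pvExpand, hc]
    · rw [List.foldl_cons, if_neg (fun h => hc (hm.mp h)), ih]
      simp [pvExpand, hc]

-- membership-equal operator sets expand identically
lemma expand_perm : pvExpand ['/', '*', '-', '+'] = pvExpand ['+', '-', '*', '/'] := by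
  funext c
  exact if_congr (by simp only [List.mem_cons, List.not_mem_nil, or_false]; tauto) rfl rfl

-- ===== VERDICT (by name: the statement is the Claim_ definition above) =====
theorem print_result_spec : Claim_equal_print_result := by
  intro calculation _
  unfold Spec_print_result print_result print_result_alt
  refine (String.toList_inj.mp ?_).symm
  rw [show ("+-*/".toList) = ['+', '-', '*', '/'] from rfl]
  simp only [List.foldl_cons, List.foldl_nil, PySem.Str.toList_replace, String.toList_ofList]
  have e0 : calculation.toList.flatMap (pvExpand []) = calculation.toList := by
    have h : pvExpand [] = fun c => [c] := funext fun c => by simp [pvExpand]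
    rw [h, List.flatMap_singleton']
  have e1 := replace_expand_step [] '+' (by simp) (by decide) calculation.toList
  rw [e0] at e1
  have e2 := replace_expand_step ['+'] '-' (by decide) (by decide) calculation.toList
  have e3 := replace_expand_step ['-', '+'] '*' (by decide) (by decide) calculation.toList
  have e4 := replace_expand_step ['*', '-', '+'] '/' (by decide) (by decide) calculation.toList
  rw [e1, e2, e3, e4, expand_perm, a_foldl]
  rfl
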